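-- pv_equiv track=rewrite | github.com/tcardella/AdventOfCode | 2024/test_2024_09.py | get_spaces
-- ===== SOURCE A (Python) =====
-- def get_spaces(disk_map):
--     sequences = []
--     start = None
--
--     for i, char in enumerate(disk_map):
--         if char == '.' and start is None:
--             # Start of a new sequence of dots
--             start = i
--         elif char != '.' and start is not None:
--             # End of a sequence of dots
--             sequences.append((start, i - 1))
--             start = None
--
--     # Make sure to capture if the last part of the string is a dot sequence
--     if start is not None:
--         sequences.append((start, len(disk_map) - 1))
--
--     return sequences
-- ===== SOURCE B (Python) =====
-- def get_spaces(disk_map):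
--     sequences = []
--     n = len(disk_map)
--     i = 0
--     while i < n:
--         if disk_map[i] == '.':
--             j = i
--             while j < n and disk_map[j] == '.':
--                 j += 1
--             sequences.append((i, j - 1))
--             i = j
--         else:
--             i += 1
--     return sequences
-- ===== Notes on version B (the rewrite author's own statement) =====
-- stated objective: alternative
-- what changed: Replaces A's one-pass state machine with an Option start sentinel and post-loop tail patch by an index loop that, on meeting a dot, consumes the whole run with an inner scan and emits the range immediately; no sentinel state and no tail handling.
import Mathlib
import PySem

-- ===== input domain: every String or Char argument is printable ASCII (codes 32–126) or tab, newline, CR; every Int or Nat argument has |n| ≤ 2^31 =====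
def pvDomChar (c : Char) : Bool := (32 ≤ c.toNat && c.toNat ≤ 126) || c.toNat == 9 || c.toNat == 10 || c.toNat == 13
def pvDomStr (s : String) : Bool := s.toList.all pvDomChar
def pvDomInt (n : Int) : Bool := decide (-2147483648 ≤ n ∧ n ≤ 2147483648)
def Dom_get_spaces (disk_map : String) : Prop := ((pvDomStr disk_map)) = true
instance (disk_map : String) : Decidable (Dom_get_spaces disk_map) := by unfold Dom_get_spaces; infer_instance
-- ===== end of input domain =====

-- B replaces A's Option-sentinel state machine (with its post-loop tail patch) by a
-- run-consuming scan that emits each dot range as soon as the run ends: alternative decomposition, same O(n) cost.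

-- ===== PORT A =====
-- the loop body of A: if char=='.' and start is None → open; elif char!='.' and start is not None → close
def pvStepA (st : List (Int × Int) × Option Int) (p : Int × Char) : List (Int × Int) × Option Int :=
  match st, p with
  | (seqs, none), (i, c) => if c = '.' then (seqs, some i) else (seqs, none)
  | (seqs, some s), (i, c) => if c ≠ '.' then (seqs ++ [(s, i - 1)], none) else (seqs, some s)

def get_spaces (disk_map : String) : List (Int × Int) :=
  let r := (PySem.List.enumerate disk_map.toList 0).foldl pvStepA ([], none)
  match r.2 with
  | some s => r.1 ++ [(s, (disk_map.toList.length : Int) - 1)]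
  | none => r.1

-- ===== PORT B =====
-- B's outer while-loop: at a dot, the inner while-loop consumes the whole run (takeWhile/dropWhile)
def pvAltGo (l : List Char) (i : Int) : List (Int × Int) :=
  match l with
  | [] => []
  | c :: rest =>
    if c = '.' then
      let k := (List.takeWhile (fun x => x == '.') (c :: rest)).length
      (i, i + k - 1) :: pvAltGo (List.dropWhile (fun x => x == '.') (c :: rest)) (i + k)
    else pvAltGo rest (i + 1)
termination_by l.length
decreasing_by
  · simp_all [List.dropWhile]
    exact List.length_dropWhile_le _ _
  · simp_all

def get_spaces_alt (disk_map : String) : List (Int × Int) := pvAltGo disk_map.toList 0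

-- ===== PRECONDITION & SPEC =====
def Spec_get_spaces (disk_map : String) (out : List (Int × Int)) : Prop := out = get_spaces_alt disk_map
instance (disk_map : String) (out : List (Int × Int)) : Decidable (Spec_get_spaces disk_map out) := by unfold Spec_get_spaces; infer_instance

-- ===== CLAIM (what is proved, stated in full; the proofs are below) =====
def Claim_equal_get_spaces : Prop := ∀ (disk_map : String), Dom_get_spaces disk_map → Spec_get_spaces disk_map (get_spaces disk_map)

-- ===== LEMMAS AND PROOFS =====

-- finalization of A's state after the loop, with n = one past the last index
def pvFinA (n : Int) (st : List (Int × Int) × Option Int) : List (Int × Int) :=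
  match st.2 with
  | some s => st.1 ++ [(s, n - 1)]
  | none => st.1

-- while inside a run of dots, A's state is unchanged
theorem pvFoldA_dots (ds : List Char) (hds : ∀ c ∈ ds, c = '.') (i s : Int) (seqs : List (Int × Int)) :
    (PySem.List.enumerate ds i).foldl pvStepA (seqs, some s) = (seqs, some s) := by
  induction ds generalizing i with
  | nil => simp [PySem.List.enumerate_nil]
  | cons c rest ih =>
    have hc : c = '.' := hds c (by simp)
    rw [PySem.List.enumerate_cons]
    simp only [List.foldl_cons, pvStepA, hc]
    simp only [ne_eq, not_true_eq_false, if_false]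
    exact ih (fun x hx => hds x (by simp [hx])) (i + 1)

-- main invariant: A's loop from the 'no open run' state, then finalized, is seqs ++ B's scan
theorem pvMain (l : List Char) (i : Int) (seqs : List (Int × Int)) :
    pvFinA (i + l.length) ((PySem.List.enumerate l i).foldl pvStepA (seqs, none)) =
      seqs ++ pvAltGo l i := by
  match l with
  | [] => simp [PySem.List.enumerate_nil, pvFinA, pvAltGo]
  | c :: rest =>
    by_cases hc : c = '.'
    · subst hc
      have hsplit := List.takeWhile_append_dropWhile (p := fun x => x == '.') (l := '.' :: rest)
      set dots := List.takeWhile (fun x => x == '.') ('.' :: rest) with hdots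
      set rest' := List.dropWhile (fun x => x == '.') ('.' :: rest) with hrest'
      have hdotsne : dots = '.' :: List.takeWhile (fun x => x == '.') rest := by
        simp [hdots, List.takeWhile]
      have hlen : dots.length + rest'.length = rest.length + 1 := by
        have := congrArg List.length hsplit; simpa using this
      have hfold1 : (PySem.List.enumerate dots i).foldl pvStepA (seqs, none) = (seqs, some i) := by
        rw [hdotsne, PySem.List.enumerate_cons]
        simp only [List.foldl_cons, pvStepA, if_true]
        exact pvFoldA_dots _ (fun x hx => by simpa using List.mem_takeWhile_imp hx) _ _ _
      have hsplitfold :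
          (PySem.List.enumerate ('.' :: rest) i).foldl pvStepA (seqs, none) =
            (PySem.List.enumerate rest' (i + dots.length)).foldl pvStepA (seqs, some i) := by
        conv_lhs => rw [← hsplit]
        rw [PySem.List.enumerate_append, List.foldl_append, hfold1]
      have haltgo : pvAltGo ('.' :: rest) i =
          (i, i + dots.length - 1) :: pvAltGo rest' (i + dots.length) := by
        rw [pvAltGo]; simp only [if_true, ← hdots, ← hrest']
      rw [hsplitfold, haltgo]
      match hr : rest' with
      | [] =>
        have hk : dots.length = rest.length + 1 := by simpa using hlen
        simp [PySem.List.enumerate_nil, pvFinA, pvAltGo, hk]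
      | d :: rest'' =>
        have hd : ¬ (d = '.') := by
          have h2 : List.dropWhile (fun x => x == '.') ('.' :: rest) = d :: rest'' := hrest'.symm
          have := List.head_dropWhile_not (p := fun x => x == '.') (l := '.' :: rest)
            (by rw [h2]; simp)
          simp [h2] at this; exact this
        rw [PySem.List.enumerate_cons]
        simp only [List.foldl_cons, pvStepA, hd, ne_eq, not_false_eq_true, if_true]
        have hrec := pvMain rest'' (i + dots.length + 1) (seqs ++ [(i, i + dots.length - 1)])
        have hlen2 : (i : Int) + (('.' :: rest).length : Int) = (i + dots.length + 1) + rest''.length := by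
          simp at hlen ⊢; omega
        rw [hlen2, hrec]
        have hstep : pvAltGo (d :: rest'') (i + dots.length) = pvAltGo rest'' (i + dots.length + 1) := by
          rw [pvAltGo]; simp [hd]
        rw [hstep]; simp
    · rw [PySem.List.enumerate_cons]
      simp only [List.foldl_cons, pvStepA, hc, if_false]
      have hrec := pvMain rest (i + 1) seqs
      have hlen2 : (i : Int) + ((c :: rest).length : Int) = (i + 1) + rest.length := by
        simp; ring
      rw [hlen2, hrec]
      rw [pvAltGo]; simp [hc]
termination_by l.length
decreasing_by
  · have h3 := congrArg List.length hsplit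
    simp only [List.length_append, List.length_cons] at h3
    have h4 : 1 ≤ dots.length := by rw [hdotsne]; simp
    simp only [List.length_cons]
    omega
  · simp

-- ===== VERDICT (by name: the statement is the Claim_ definition above) =====
theorem get_spaces_spec : Claim_equal_get_spaces := by
  intro disk_map _
  unfold Spec_get_spaces get_spaces get_spaces_alt
  have := pvMain disk_map.toList 0 []
  simp only [zero_add, List.nil_append] at this
  rw [← this]
  rfl
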